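-- pv_equiv track=rewrite | github.com/jyh/jas | jas/algorithms/hyphenator.py | split_pattern
-- ===== SOURCE A (Python) =====
-- def split_pattern(pat: str) -> tuple[str, list[int]]:
--     """Split a TeX hyphenation pattern into its letter sequence and
--     per-position digit list. ``2'2`` -> letters="'", digits=[2,2]
--     (digit at position 0, between, after). The digit list has length
--     ``len(letters) + 1``; positions with no digit get 0."""
--     letters: list[str] = []
--     digits: list[int] = []
--     pending: int | None = None
--     for c in pat:
--         if "0" <= c <= "9":
--             pending = ord(c) - ord("0")
--         else:
--             digits.append(pending if pending is not None else 0)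
--             pending = None
--             letters.append(c)
--     digits.append(pending if pending is not None else 0)
--     return ("".join(letters), digits)
-- ===== SOURCE B (Python) =====
-- def split_pattern(pat: str) -> tuple[str, list[int]]:
--     letters = "".join(c for c in pat if not ("0" <= c <= "9"))
--     digits = [0] * (len(letters) + 1)
--     pos = 0
--     for c in pat:
--         if "0" <= c <= "9":
--             digits[pos] = ord(c) - ord("0")
--         else:
--             pos += 1
--     return (letters, digits)
-- ===== Notes on version B (the rewrite author's own statement) =====
-- stated objective: alternative
-- what changed: Replaced the single-pass pending-accumulator with appends by a two-pass scheme: first pass filters the letters, then digits is preallocated to [0]*(len(letters)+1) and a second scan writes each digit at its letter-position index (later digits overwrite earlier ones).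
import Mathlib
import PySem

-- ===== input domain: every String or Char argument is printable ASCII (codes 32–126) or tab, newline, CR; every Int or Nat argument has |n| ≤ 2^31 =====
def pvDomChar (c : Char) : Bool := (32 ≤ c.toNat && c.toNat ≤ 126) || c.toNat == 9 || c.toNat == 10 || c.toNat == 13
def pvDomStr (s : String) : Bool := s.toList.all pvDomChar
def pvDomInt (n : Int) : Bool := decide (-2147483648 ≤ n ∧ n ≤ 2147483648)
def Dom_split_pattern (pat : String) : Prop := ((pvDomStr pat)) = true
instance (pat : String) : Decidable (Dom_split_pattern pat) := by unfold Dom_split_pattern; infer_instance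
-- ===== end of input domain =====

-- B replaces A's single pass with pending/appends by a two-pass, preallocate-and-index-by-position scheme; same cost, alternative structure.

-- "0" <= c <= "9" (exact ASCII digit test, same in both programs)
def pvIsDig (c : Char) : Bool := '0' ≤ c && c ≤ '9'

-- ord(c) - ord('0')
def pvDigVal (c : Char) : Int := (c.toNat : Int) - ('0'.toNat : Int)

-- ===== PORT A =====
-- A's loop, carried state: letters, digits, pending
def splitA : List Char → List Char → List Int → Option Int → List Char × List Int
  | [], letters, digits, pending => (letters, digits ++ [pending.getD 0])
  | c :: cs, letters, digits, pending =>
    if pvIsDig c then splitA cs letters digits (some (pvDigVal c))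
    else splitA cs (letters ++ [c]) (digits ++ [pending.getD 0]) none

def split_pattern (pat : String) : String × List Int :=
  (String.ofList (splitA pat.toList [] [] none).1, (splitA pat.toList [] [] none).2)

-- ===== PORT B =====
-- B's second loop: digits[pos] = val on a digit char, pos += 1 on a letter
def splitB : List Char → List Int → Nat → List Int
  | [], digits, _ => digits
  | c :: cs, digits, pos =>
    if pvIsDig c then splitB cs (digits.set pos (pvDigVal c)) pos
    else splitB cs digits (pos + 1)

def split_pattern_alt (pat : String) : String × List Int :=
  (String.ofList (pat.toList.filter (fun c => !pvIsDig c)),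
   splitB pat.toList (List.replicate ((pat.toList.filter (fun c => !pvIsDig c)).length + 1) 0) 0)

-- ===== PRECONDITION & SPEC =====
def Spec_split_pattern (pat : String) (out : String × List Int) : Prop := out = split_pattern_alt pat
instance (pat : String) (out : String × List Int) : Decidable (Spec_split_pattern pat out) := by unfold Spec_split_pattern; infer_instance

-- ===== CLAIM (what is proved, stated in full; the proofs are below) =====
def Claim_equal_split_pattern : Prop := ∀ (pat : String), Dom_split_pattern pat → Spec_split_pattern pat (split_pattern pat)

-- ===== LEMMAS AND PROOFS =====

-- A's digit list, recursively (reference shape for both proofs)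
def digSpec : List Char → Option Int → List Int
  | [], p => [p.getD 0]
  | c :: cs, p =>
    if pvIsDig c then digSpec cs (some (pvDigVal c))
    else p.getD 0 :: digSpec cs none

theorem splitA_eq (cs : List Char) : ∀ (ls : List Char) (ds : List Int) (p : Option Int),
    splitA cs ls ds p = (ls ++ cs.filter (fun c => !pvIsDig c), ds ++ digSpec cs p) := by
  induction cs with
  | nil => intro ls ds p; simp [splitA, digSpec]
  | cons c cs ih =>
    intro ls ds p
    by_cases h : pvIsDig c = true
    · simp [splitA, digSpec, h, ih]
    · simp only [Bool.not_eq_true] at h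
      simp [splitA, digSpec, h, ih]

theorem splitB_eq (cs : List Char) : ∀ (ds : List Int) (p : Option Int),
    splitB cs (ds ++ p.getD 0 :: List.replicate ((cs.filter (fun c => !pvIsDig c)).length) 0) ds.length
      = ds ++ digSpec cs p := by
  induction cs with
  | nil => intro ds p; simp [splitB, digSpec]
  | cons c cs ih =>
    intro ds p
    by_cases h : pvIsDig c = true
    · have hset : (ds ++ p.getD 0 :: List.replicate ((cs.filter (fun c => !pvIsDig c)).length) 0).set ds.length (pvDigVal c)
          = ds ++ (some (pvDigVal c)).getD 0 :: List.replicate ((cs.filter (fun c => !pvIsDig c)).length) 0 := by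
        rw [List.set_append_right _ _ (le_refl _)]
        simp
      rw [show List.filter (fun c => !pvIsDig c) (c :: cs) = List.filter (fun c => !pvIsDig c) cs from by
        simp [h]]
      simp only [splitB, if_pos h]
      rw [hset, ih, digSpec]
      simp [h]
    · simp only [Bool.not_eq_true] at h
      have : ds ++ p.getD 0 :: List.replicate ((List.filter (fun c => !pvIsDig c) (c :: cs)).length) 0
          = (ds ++ [p.getD 0]) ++ (Option.none.getD 0 : Int) :: List.replicate ((cs.filter (fun c => !pvIsDig c)).length) 0 := by
        simp [h, List.replicate_succ]
      simp only [splitB, h, if_false, Bool.false_eq_true]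
      rw [show ds.length + 1 = (ds ++ [p.getD 0]).length by simp, this, ih, digSpec]
      simp [h]

-- ===== VERDICT (by name: the statement is the Claim_ definition above) =====
theorem split_pattern_spec : Claim_equal_split_pattern := by
  intro pat _
  unfold Spec_split_pattern split_pattern split_pattern_alt
  have hA := splitA_eq pat.toList [] [] none
  have hB := splitB_eq pat.toList [] none
  simp only [List.nil_append, List.length_nil, Option.getD_none] at hA hB
  rw [hA, List.replicate_succ, hB]
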